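-- pv_equiv track=rewrite | github.com/mwalbeck/determine-docker-tags | determine_docker_tags/__init__.py | determine_tags
-- ===== SOURCE A (Python) =====
-- def determine_tags(
--         version_string, app_env, include_major, include_suffix, version_passthrough, image_name, separator
-- ):
--     tags = ""
--
--     if version_passthrough == "yes":
--         return version_string
--
--     if "-" in version_string:
--         extra_info = version_string[version_string.find("-"):]
--         version_string = version_string[: version_string.find("-")]
--     else:
--         extra_info = ""
--
--     if include_suffix == "no":
--         extra_info = ""
--
--     if app_env:
--         app_env = "-" + app_env
--     else:
--         app_env = ""
--
--     while "." in version_string: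
--         tags = tags + image_name + version_string + extra_info + app_env + separator
--         version_string = version_string[: version_string.rfind(".")]
--
--     if include_major == "yes" and version_string != "0":
--         tags = tags + image_name + version_string + extra_info + app_env
--     else:
--         tags = tags[:-1]
--
--     return tags
-- ===== SOURCE B (Python) =====
-- def determine_tags(
--         version_string, app_env, include_major, include_suffix, version_passthrough, image_name, separator
-- ):
--     if version_passthrough == "yes":
--         return version_string
--
--     idx = version_string.find("-")
--     core = version_string[:idx] if idx >= 0 else version_string
--     extra_info = version_string[idx:] if (idx >= 0 and include_suffix != "no") else ""
--     env = "-" + app_env if app_env else ""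
--
--     parts = core.split(".")
--     tags = "".join(
--         image_name + ".".join(parts[:i]) + extra_info + env + separator
--         for i in range(len(parts), 1, -1)
--     )
--     if include_major == "yes" and parts[0] != "0":
--         return tags + image_name + parts[0] + extra_info + env
--     return tags[:-1]
-- ===== Notes on version B (the rewrite author's own statement) =====
-- stated objective: simpler
-- what changed: Replaces A's destructive while-loop (repeatedly chopping the version string at its last '.' via rfind) by splitting the version once on '.' and building each tag from a prefix join over descending prefix lengths, with the major component read directly as parts[0].
import Mathlib
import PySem

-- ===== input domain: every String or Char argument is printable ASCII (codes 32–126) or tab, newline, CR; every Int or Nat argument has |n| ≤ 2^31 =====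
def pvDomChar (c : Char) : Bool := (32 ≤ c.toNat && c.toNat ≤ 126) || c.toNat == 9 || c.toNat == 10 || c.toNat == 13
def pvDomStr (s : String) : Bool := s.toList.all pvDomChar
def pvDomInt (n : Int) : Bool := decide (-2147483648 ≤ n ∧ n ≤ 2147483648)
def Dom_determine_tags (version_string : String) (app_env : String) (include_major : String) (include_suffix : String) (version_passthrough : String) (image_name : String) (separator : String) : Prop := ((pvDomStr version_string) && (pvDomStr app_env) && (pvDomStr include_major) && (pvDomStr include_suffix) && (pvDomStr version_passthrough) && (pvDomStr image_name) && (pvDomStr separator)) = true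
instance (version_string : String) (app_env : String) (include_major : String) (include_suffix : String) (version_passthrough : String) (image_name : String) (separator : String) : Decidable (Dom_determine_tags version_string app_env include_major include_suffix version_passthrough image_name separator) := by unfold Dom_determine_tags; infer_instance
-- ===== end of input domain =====

-- ===== PORT A =====
-- B builds the tags from a one-time split on '.' instead of A's destructive rfind-chopping loop (objective: simpler).

-- Lemmas cited by tagLoopA's decreasing_by (must precede the definition).
theorem pvRfindGoCases (s sub : List Char) (j : Nat) :
    PySem.Chars.rfind.go s sub j = -1 ∨
      (∃ m : Nat, m ≤ j ∧ PySem.Chars.rfind.go s sub j = (m : Int) ∧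
        sub.isPrefixOf (s.drop m) = true) := by
  induction j with
  | zero =>
      by_cases h : sub.isPrefixOf s = true
      · exact Or.inr ⟨0, le_refl _, by simp [PySem.Chars.rfind.go, h], by simp [h]⟩
      · exact Or.inl (by simp [PySem.Chars.rfind.go, h])
  | succ j ih =>
      by_cases h : sub.isPrefixOf (s.drop (j + 1)) = true
      · exact Or.inr ⟨j + 1, le_refl _, by simp [PySem.Chars.rfind.go, h], h⟩
      · rcases ih with h0 | ⟨m, hm, he, hp⟩
        · exact Or.inl (by simp [PySem.Chars.rfind.go, h, h0])
        · exact Or.inr ⟨m, Nat.le_succ_of_le hm, by simp [PySem.Chars.rfind.go, h, he], hp⟩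

theorem pvRfindGoFound (s sub : List Char) (m j : Nat)
    (hm : sub.isPrefixOf (s.drop m) = true) (hmj : m ≤ j) :
    PySem.Chars.rfind.go s sub j ≠ -1 := by
  induction j with
  | zero =>
      have hm0 : m = 0 := Nat.le_zero.mp hmj
      subst hm0
      simp only [List.drop_zero] at hm
      simp [PySem.Chars.rfind.go, hm]
  | succ j ih =>
      by_cases h : sub.isPrefixOf (s.drop (j + 1)) = true
      · simp only [PySem.Chars.rfind.go, h, if_true]
        intro hc
        omega
      · have hmj' : m ≤ j := by
          rcases Nat.lt_or_ge m (j + 1) with h' | h'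
          · omega
          · exfalso; have : m = j + 1 := by omega
            subst this; exact h hm
        simp [PySem.Chars.rfind.go, h, ih hmj']

theorem pvChopLt (vs : List Char) (h : PySem.Chars.isIn ['.'] vs = true) :
    (PySem.Chars.slice vs none (some (PySem.Chars.rfind vs ['.']))).length < vs.length := by
  have hinf : ['.'] <:+: vs := (PySem.Chars.isIn_iff_infix _ _).mp h
  obtain ⟨j, hj⟩ : ∃ j, ['.'] <+: vs.drop j :=
    (PySem.Chars.exists_prefix_drop_iff_isIn _ _).mpr h
  have hjlen : j < vs.length := by
    by_contra hge
    have : vs.drop j = [] := List.drop_eq_nil_of_le (by omega)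
    rw [this] at hj
    exact absurd (List.eq_nil_of_prefix_nil hj) (by simp)
  have hne : PySem.Chars.rfind.go vs ['.'] vs.length ≠ -1 :=
    pvRfindGoFound vs ['.'] j vs.length ((List.isPrefixOf_iff_prefix).mpr hj) (le_of_lt hjlen)
  rcases pvRfindGoCases vs ['.'] vs.length with h0 | ⟨m, hm, he, hp⟩
  · exact absurd h0 hne
  · have hrf : PySem.Chars.rfind vs ['.'] = (m : Int) := he
    have hmlt : m < vs.length := by
      by_contra hge
      have : vs.drop m = [] := List.drop_eq_nil_of_le (by omega)
      rw [this] at hp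
      simp [List.isPrefixOf] at hp
    rw [hrf]
    have : PySem.Chars.slice vs none (some ((m : Nat) : Int)) = vs.take m := by
      simpa using PySem.List.slice_to_natCast vs m
    rw [this, List.length_take]
    omega

-- while "." in version_string: append one tag, chop at the last '.' (A's loop, recursion on length)
def tagLoopA (img extra env sep : List Char) (vs tags : List Char) : List Char × List Char :=
  if h : PySem.Chars.isIn ['.'] vs = true then
    tagLoopA img extra env sep
      (PySem.Chars.slice vs none (some (PySem.Chars.rfind vs ['.'])))
      (tags ++ img ++ vs ++ extra ++ env ++ sep)
  else
    (tags, vs)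
termination_by vs.length
decreasing_by exact pvChopLt vs h

def determine_tags (version_string : String) (app_env : String) (include_major : String) (include_suffix : String) (version_passthrough : String) (image_name : String) (separator : String) : String :=
  if version_passthrough = "yes" then version_string
  else
    let vs0 := version_string.toList
    let extra0 := if PySem.Chars.isIn ['-'] vs0 = true
      then PySem.Chars.slice vs0 (some (PySem.Chars.find vs0 ['-'])) none else []
    let vs1 := if PySem.Chars.isIn ['-'] vs0 = true
      then PySem.Chars.slice vs0 none (some (PySem.Chars.find vs0 ['-'])) else vs0
    let extra := if include_suffix = "no" then [] else extra0
    let env := if app_env ≠ "" then '-' :: app_env.toList else []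
    let r := tagLoopA image_name.toList extra env separator.toList vs1 []
    if include_major = "yes" ∧ r.2 ≠ ['0'] then
      String.ofList (r.1 ++ image_name.toList ++ r.2 ++ extra ++ env)
    else
      String.ofList (PySem.Chars.slice r.1 none (some (-1)))

-- ===== PORT B =====
-- "".join(image_name + ".".join(parts[:i]) + extra + env + separator for i in range(len(parts), 1, -1))
def tagsB (img extra env sep : List Char) (parts : List (List Char)) : List Char :=
  ((PySem.List.pyRange (parts.length : Int) 1 (-1)).map (fun i =>
    img ++ PySem.Chars.join ['.'] (PySem.List.slice parts none (some i)) ++ extra ++ env ++ sep)).flatten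

def determine_tags_alt (version_string : String) (app_env : String) (include_major : String) (include_suffix : String) (version_passthrough : String) (image_name : String) (separator : String) : String :=
  if version_passthrough = "yes" then version_string
  else
    let vs := version_string.toList
    let idx := PySem.Chars.find vs ['-']
    let core := if 0 ≤ idx then PySem.Chars.slice vs none (some idx) else vs
    let extra := if 0 ≤ idx ∧ include_suffix ≠ "no" then PySem.Chars.slice vs (some idx) none else []
    let env := if app_env ≠ "" then '-' :: app_env.toList else []
    -- core.split("."): sep is the non-empty literal ".", so split? = some (splitOn);
    -- parts[0]: split never returns [], so headD [] is exact here
    let parts := PySem.Chars.splitOn core ['.']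
    let tags := tagsB image_name.toList extra env separator.toList parts
    if include_major = "yes" ∧ parts.headD [] ≠ ['0'] then
      String.ofList (tags ++ image_name.toList ++ parts.headD [] ++ extra ++ env)
    else
      String.ofList (PySem.Chars.slice tags none (some (-1)))

-- ===== PRECONDITION & SPEC =====
def Spec_determine_tags (version_string : String) (app_env : String) (include_major : String) (include_suffix : String) (version_passthrough : String) (image_name : String) (separator : String) (out : String) : Prop := out = determine_tags_alt version_string app_env include_major include_suffix version_passthrough image_name separator
instance (version_string : String) (app_env : String) (include_major : String) (include_suffix : String) (version_passthrough : String) (image_name : String) (separator : String) (out : String) : Decidable (Spec_determine_tags version_string app_env include_major include_suffix version_passthrough image_name separator out) := by unfold Spec_determine_tags; infer_instance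

-- ===== CLAIM (what is proved, stated in full; the proofs are below) =====
def Claim_equal_determine_tags : Prop := ∀ (version_string : String) (app_env : String) (include_major : String) (include_suffix : String) (version_passthrough : String) (image_name : String) (separator : String), Dom_determine_tags version_string app_env include_major include_suffix version_passthrough image_name separator → Spec_determine_tags version_string app_env include_major include_suffix version_passthrough image_name separator (determine_tags version_string app_env include_major include_suffix version_passthrough image_name separator)

-- ===== LEMMAS AND PROOFS =====

-- proof-side model of core.split("."): split on '.' with structural recursion
def split1 : List Char → List (List Char)
  | [] => [[]]
  | x :: xs => if x = '.' then [] :: split1 xs else (split1 xs).modifyHead (fun p => x :: p)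

theorem split1_ne_nil (l : List Char) : split1 l ≠ [] := by
  cases l with
  | nil => simp [split1]
  | cons x xs =>
      by_cases hx : x = '.'
      · simp [split1, hx]
      · have := split1_ne_nil xs
        cases h : split1 xs with
        | nil => exact absurd h this
        | cons a t => simp [split1, hx, h]

theorem pvSpGo (l : List Char) : ∀ (fuel : Nat) (cur : List Char) (acc : List (List Char)),
    l.length < fuel →
    PySem.Chars.splitOn.go ['.'] fuel l cur acc
      = acc.reverse ++ (split1 l).modifyHead (fun p => cur.reverse ++ p) := by
  induction l with
  | nil =>
      intro fuel cur acc hf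
      cases fuel with
      | zero => omega
      | succ f => simp [PySem.Chars.splitOn.go, split1]
  | cons x xs ih =>
      intro fuel cur acc hf
      cases fuel with
      | zero => simp at hf
      | succ f =>
        have hxs : xs.length < f := by simp at hf; omega
        by_cases hx : x = '.'
        · subst hx
          have hp : (['.'] : List Char).isPrefixOf ('.' :: xs) = true := by
            simp [List.isPrefixOf]
          rw [show PySem.Chars.splitOn.go ['.'] (f + 1) ('.' :: xs) cur acc
              = PySem.Chars.splitOn.go ['.'] f (List.drop 1 ('.' :: xs)) [] (cur.reverse :: acc) by
            simp [PySem.Chars.splitOn.go, hp]]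
          simp only [List.drop_succ_cons, List.drop_zero]
          rw [ih f [] (cur.reverse :: acc) hxs]
          have hmod : (split1 xs).modifyHead (fun p => List.reverse [] ++ p) = split1 xs := by
            cases split1 xs <;> simp
          rw [hmod]
          simp [split1]
        · have hp : (['.'] : List Char).isPrefixOf (x :: xs) = false := by
            simp [List.isPrefixOf]
            intro h; exact absurd h.symm hx
          rw [show PySem.Chars.splitOn.go ['.'] (f + 1) (x :: xs) cur acc
              = PySem.Chars.splitOn.go ['.'] f xs (x :: cur) acc by
            simp [PySem.Chars.splitOn.go, hp]]
          rw [ih f (x :: cur) acc hxs]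
          cases hs : split1 xs with
          | nil => exact absurd hs (split1_ne_nil xs)
          | cons a t => simp [split1, hx, hs]

theorem splitOn_eq_split1 (l : List Char) : PySem.Chars.splitOn l ['.'] = split1 l := by
  unfold PySem.Chars.splitOn
  rw [pvSpGo l (l.length + 1) [] [] (by omega)]
  cases h : split1 l with
  | nil => exact absurd h (split1_ne_nil l)
  | cons a t => simp

theorem join_cons_ne (a : List Char) (t : List (List Char)) (ht : t ≠ []) :
    PySem.Chars.join ['.'] (a :: t) = a ++ '.' :: PySem.Chars.join ['.'] t := by
  cases t with
  | nil => exact absurd rfl ht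
  | cons b t' => rw [PySem.Chars.join_cons_cons]; simp

theorem join_split1 (l : List Char) : PySem.Chars.join ['.'] (split1 l) = l := by
  induction l with
  | nil => simp [split1, PySem.Chars.join_singleton]
  | cons x xs ih =>
      by_cases hx : x = '.'
      · subst hx
        rw [show split1 ('.' :: xs) = [] :: split1 xs by simp [split1]]
        rw [join_cons_ne [] (split1 xs) (split1_ne_nil xs)]
        simp [ih]
      · rw [show split1 (x :: xs) = (split1 xs).modifyHead (fun p => x :: p) by simp [split1, hx]]
        cases hs : split1 xs with
        | nil => exact absurd hs (split1_ne_nil xs)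
        | cons a t =>
            rw [hs] at ih
            cases t with
            | nil => simp [PySem.Chars.join_singleton] at ih ⊢; simp [ih]
            | cons b t' =>
                simp only [List.modifyHead_cons]
                rw [PySem.Chars.join_cons_cons] at ih
                rw [PySem.Chars.join_cons_cons]
                simp [← ih]

theorem split1_no_dot (l : List Char) : ∀ p ∈ split1 l, '.' ∉ p := by
  induction l with
  | nil => simp [split1]
  | cons x xs ih =>
      by_cases hx : x = '.'
      · subst hx
        rw [show split1 ('.' :: xs) = [] :: split1 xs by simp [split1]]
        intro p hp
        rcases List.mem_cons.mp hp with hp | hp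
        · subst hp; simp
        · exact ih p hp
      · rw [show split1 (x :: xs) = (split1 xs).modifyHead (fun p => x :: p) by simp [split1, hx]]
        cases hs : split1 xs with
        | nil => exact absurd hs (split1_ne_nil xs)
        | cons a t =>
            intro p hp
            rcases List.mem_cons.mp hp with hp | hp
            · subst hp
              intro hd
              rcases List.mem_cons.mp hd with hd | hd
              · exact hx hd.symm
              · exact ih a (by simp [hs]) hd
            · exact ih p (by simp [hs, hp])

theorem join_append_last (qs : List (List Char)) (last : List Char) (h : qs ≠ []) :
    PySem.Chars.join ['.'] (qs ++ [last]) = PySem.Chars.join ['.'] qs ++ '.' :: last := by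
  induction qs with
  | nil => exact absurd rfl h
  | cons q qs' ih =>
      cases qs' with
      | nil => simp [join_cons_ne q [last] (by simp), PySem.Chars.join_singleton]
      | cons b t =>
          rw [List.cons_append, join_cons_ne q ((b :: t) ++ [last]) (by simp),
            join_cons_ne q (b :: t) (by simp), ih (by simp)]
          simp

theorem prefix_dot_mem {l : List Char} (h : (['.'] : List Char).isPrefixOf l = true) :
    '.' ∈ l := by
  have := (List.isPrefixOf_iff_prefix).mp h
  exact this.subset (by simp)

theorem pvRfindGoLast (s : List Char) (m : Nat)
    (hm : (['.'] : List Char).isPrefixOf (s.drop m) = true)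
    (hup : ∀ i : Nat, m < i → ¬ (['.'] : List Char).isPrefixOf (s.drop i) = true) :
    ∀ j, m ≤ j → PySem.Chars.rfind.go s ['.'] j = m := by
  intro j
  induction j with
  | zero =>
      intro hj
      have hm0 : m = 0 := Nat.le_zero.mp hj
      subst hm0
      simp only [List.drop_zero] at hm
      simp [PySem.Chars.rfind.go, hm]
  | succ j ih =>
      intro hj
      by_cases h : (['.'] : List Char).isPrefixOf (s.drop (j + 1)) = true
      · have : ¬ m < j + 1 := fun hlt => hup (j + 1) hlt h
        have hmj : m = j + 1 := by omega
        subst hmj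
        simp [PySem.Chars.rfind.go, h]
      · have hmj : m ≤ j := by
          rcases Nat.lt_or_ge m (j + 1) with h' | h'
          · omega
          · exfalso
            have : m = j + 1 := by omega
            subst this
            exact h hm
        simp [PySem.Chars.rfind.go, h, ih hmj]

theorem rfind_last (xs ys : List Char) (hy : '.' ∉ ys) :
    PySem.Chars.rfind (xs ++ '.' :: ys) ['.'] = (xs.length : Int) := by
  have hm : (['.'] : List Char).isPrefixOf ((xs ++ '.' :: ys).drop xs.length) = true := by
    rw [List.drop_left]
    simp [List.isPrefixOf]
  have hup : ∀ i : Nat, xs.length < i →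
      ¬ (['.'] : List Char).isPrefixOf ((xs ++ '.' :: ys).drop i) = true := by
    intro i hi hpre
    have hmem : '.' ∈ (xs ++ '.' :: ys).drop i := prefix_dot_mem hpre
    rw [List.drop_append] at hmem
    have hx : List.drop i xs = [] := List.drop_eq_nil_of_le (by omega)
    rw [hx, List.nil_append] at hmem
    obtain ⟨k, hk⟩ : ∃ k, i - xs.length = k + 1 := ⟨i - xs.length - 1, by omega⟩
    rw [hk, List.drop_succ_cons] at hmem
    exact hy (List.mem_of_mem_drop hmem)
  have hlen : xs.length ≤ (xs ++ '.' :: ys).length := by simp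
  have := pvRfindGoLast (xs ++ '.' :: ys) xs.length hm hup ((xs ++ '.' :: ys).length) hlen
  simpa [PySem.Chars.rfind] using this

theorem isIn_dot_append (xs ys : List Char) :
    PySem.Chars.isIn ['.'] (xs ++ '.' :: ys) = true := by
  rw [PySem.Chars.isIn_iff_infix]
  exact ⟨xs, ys, by simp⟩

theorem isIn_dot_false {p : List Char} (h : '.' ∉ p) :
    PySem.Chars.isIn ['.'] p = false := by
  rw [PySem.Chars.isIn_eq_false_iff]
  intro hinf
  exact h (hinf.subset (by simp))

theorem pyRange_desc_eq (n : Nat) :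
    PySem.List.pyRange (n : Int) 1 (-1) = (List.range (n - 1)).map (fun (k : Nat) => (n : Int) - (k : Int)) := by
  unfold PySem.List.pyRange
  rw [if_neg (by norm_num : ¬ (-1 : Int) = 0)]
  simp only [show ¬ (0 : Int) < -1 by norm_num, if_false]
  by_cases h : (1 : Int) < (n : Int)
  · rw [if_pos h]
    have hc : (((n : Int) - 1 + -(-1) - 1) / -(-1)).toNat = n - 1 := by
      norm_num
    rw [hc]
    apply List.map_congr_left
    intro k _
    push_cast
    ring
  · rw [if_neg h]
    have hn : n - 1 = 0 := by omega
    rw [hn]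
    simp

theorem tagsB_singleton (img extra env sep p) : tagsB img extra env sep [p] = [] := by
  simp [tagsB]

theorem tagsB_append_last (img extra env sep : List Char) (qs : List (List Char))
    (last : List Char) (h : qs ≠ []) :
    tagsB img extra env sep (qs ++ [last])
      = (img ++ PySem.Chars.join ['.'] (qs ++ [last]) ++ extra ++ env ++ sep)
        ++ tagsB img extra env sep qs := by
  obtain ⟨m, hm⟩ : ∃ m, qs.length = m + 1 := by
    cases qs with
    | nil => exact absurd rfl h
    | cons a t => exact ⟨t.length, by simp⟩
  rw [tagsB, tagsB, pyRange_desc_eq, pyRange_desc_eq]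
  have hlen : (qs ++ [last]).length = m + 2 := by simp [hm]
  rw [hlen, hm]
  have h21 : m + 2 - 1 = m + 1 := rfl
  have h11 : m + 1 - 1 = m := rfl
  rw [h21, h11, List.range_succ_eq_map]
  simp only [List.map_cons, List.map_map, List.flatten_cons]
  have hhead : ((m + 2 : Nat) : Int) - ((0 : Nat) : Int) = (((m + 2 : Nat) : Int)) := by
    push_cast; ring
  congr 1
  · -- head tag is the full join
    have hslice : PySem.List.slice (qs ++ [last]) none (some (((m + 2 : Nat) : Int) - ((0 : Nat) : Int)))
        = qs ++ [last] := by
      rw [hhead, PySem.List.slice_to_natCast]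
      exact List.take_of_length_le (by simp [hm])
    rw [hslice]
  · -- remaining prefixes unaffected by the last component
    congr 1
    apply List.map_congr_left
    intro k hk
    have hk' : k < m := List.mem_range.mp hk
    have hi : ((m + 2 : Nat) : Int) - ((k.succ : Nat) : Int) = (((m + 1 - k : Nat)) : Int) := by
      push_cast [Nat.succ_eq_add_one]; omega
    have hi2 : ((m + 1 : Nat) : Int) - ((k : Nat) : Int) = (((m + 1 - k : Nat)) : Int) := by
      push_cast; omega
    simp only [Function.comp_apply]
    rw [hi, hi2, PySem.List.slice_to_natCast, PySem.List.slice_to_natCast,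
      List.take_append_of_le_length (by omega : m + 1 - k ≤ qs.length)]

theorem tagLoopA_eq (img extra env sep : List Char) :
    ∀ ps : List (List Char), ps ≠ [] → (∀ p ∈ ps, '.' ∉ p) → ∀ tags,
      tagLoopA img extra env sep (PySem.Chars.join ['.'] ps) tags
        = (tags ++ tagsB img extra env sep ps, ps.headD []) := by
  intro ps
  induction ps using List.reverseRecOn with
  | nil => intro h; exact absurd rfl h
  | append_singleton qs last ih =>
      intro _ hnd tags
      by_cases hq : qs = []
      · subst hq
        simp only [List.nil_append]
        rw [PySem.Chars.join_singleton, tagLoopA]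
        have hl : '.' ∉ last := hnd last (by simp)
        simp [isIn_dot_false hl, tagsB_singleton]
      · have hlast : '.' ∉ last := hnd last (by simp)
        rw [join_append_last qs last hq, tagLoopA]
        have hin : PySem.Chars.isIn ['.'] (PySem.Chars.join ['.'] qs ++ '.' :: last) = true :=
          isIn_dot_append _ _
        rw [dif_pos hin, rfind_last (PySem.Chars.join ['.'] qs) last hlast]
        have hslice : PySem.Chars.slice (PySem.Chars.join ['.'] qs ++ '.' :: last) none
            (some ((PySem.Chars.join ['.'] qs).length : Int)) = PySem.Chars.join ['.'] qs := by
          have := PySem.List.slice_to_natCast (PySem.Chars.join ['.'] qs ++ '.' :: last)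
            (PySem.Chars.join ['.'] qs).length
          simpa [List.take_left] using this
        rw [hslice, ih hq (fun p hp => hnd p (by simp [hp]))]
        rw [tagsB_append_last img extra env sep qs last hq, join_append_last qs last hq]
        simp only [Prod.mk.injEq]
        constructor
        · simp [List.append_assoc]
        · cases qs with
          | nil => exact absurd rfl hq
          | cons a t => simp

theorem isIn_dash_iff (vs : List Char) :
    PySem.Chars.isIn ['-'] vs = true ↔ 0 ≤ PySem.Chars.find vs ['-'] := by
  rw [PySem.Chars.isIn_iff_infix, ← PySem.Chars.find_nonneg_iff]

theorem tails_eq (img extra env sep core : List Char) (include_major : String) :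
    (if include_major = "yes" ∧ (tagLoopA img extra env sep core []).2 ≠ ['0'] then
       String.ofList ((tagLoopA img extra env sep core []).1 ++ img ++ (tagLoopA img extra env sep core []).2 ++ extra ++ env)
     else String.ofList (PySem.Chars.slice (tagLoopA img extra env sep core []).1 none (some (-1))))
  = (if include_major = "yes" ∧ (PySem.Chars.splitOn core ['.']).headD [] ≠ ['0'] then
       String.ofList (tagsB img extra env sep (PySem.Chars.splitOn core ['.']) ++ img ++ (PySem.Chars.splitOn core ['.']).headD [] ++ extra ++ env)
     else String.ofList (PySem.Chars.slice (tagsB img extra env sep (PySem.Chars.splitOn core ['.'])) none (some (-1)))) := by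
  have hps := tagLoopA_eq img extra env sep (split1 core) (split1_ne_nil core) (split1_no_dot core) []
  rw [join_split1] at hps
  rw [splitOn_eq_split1, hps]
  simp

-- ===== VERDICT (by name: the statement is the Claim_ definition above) =====
theorem determine_tags_spec : Claim_equal_determine_tags := by
  intro version_string app_env include_major include_suffix version_passthrough image_name separator _
  unfold Spec_determine_tags determine_tags determine_tags_alt
  by_cases hvp : version_passthrough = "yes"
  · simp [hvp]
  · simp only [if_neg hvp]
    by_cases hdash : PySem.Chars.isIn ['-'] version_string.toList = true
    · have hidx : 0 ≤ PySem.Chars.find version_string.toList ['-'] :=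
        (isIn_dash_iff version_string.toList).mp hdash
      by_cases hsuf : include_suffix = "no"
      · simp only [hdash, hsuf, hidx, ne_eq, eq_self_iff_true, not_true, not_false_iff,
          true_and, and_true, and_false, false_and, ite_true, ite_false]
        exact tails_eq _ _ _ _ _ _
      · simp only [hdash, hsuf, hidx, ne_eq, eq_self_iff_true, not_true, not_false_iff,
          true_and, and_true, and_false, false_and, ite_true, ite_false]
        exact tails_eq _ _ _ _ _ _
    · have hidx : ¬ 0 ≤ PySem.Chars.find version_string.toList ['-'] :=
        fun hc => hdash ((isIn_dash_iff version_string.toList).mpr hc)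
      by_cases hsuf : include_suffix = "no"
      · simp only [hdash, hsuf, hidx, ne_eq, eq_self_iff_true, not_true, not_false_iff,
          true_and, and_true, and_false, false_and, ite_true, ite_false]
        exact tails_eq _ _ _ _ _ _
      · simp only [hdash, hsuf, hidx, ne_eq, eq_self_iff_true, not_true, not_false_iff,
          true_and, and_true, and_false, false_and, ite_true, ite_false]
        exact tails_eq _ _ _ _ _ _
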